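-- pv_equiv track=rewrite | github.com/codeInDaSpace/AmazonOpinionEngine | codes/code2.py | proximity
-- ===== SOURCE A (Python) =====
-- def proximity(tokens, aWord, oWord, maxi=5):
--     aPos = [i for i, token in enumerate(tokens) if token in aWord]
--     oPos = [i for i, token in enumerate(tokens) if token in oWord]
--
--     i, j = 0, 0
--     while i < len(aPos) and j < len(oPos):
--         aCur = aPos[i]
--         oCur = oPos[j]
--         if abs(aCur - oCur) <= maxi:
--             return True
--         if aCur < oCur:
--             i += 1
--         else:
--             j += 1
--     return False
-- ===== SOURCE B (Python) =====
-- def proximity(tokens, aWord, oWord, maxi=5):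
--     lastA = None
--     lastO = None
--     for i, token in enumerate(tokens):
--         if token in aWord:
--             if lastO is not None and i - lastO <= maxi:
--                 return True
--             lastA = i
--         if token in oWord:
--             if lastA is not None and i - lastA <= maxi:
--                 return True
--             lastO = i
--     return False
-- ===== Notes on version B (the rewrite author's own statement) =====
-- stated objective: faster
-- what changed: Replaced the two full position-list comprehensions plus a two-pointer merge with a single early-exiting pass over enumerate(tokens) that only remembers the most recent aspect and opinion indices.
import Mathlib
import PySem

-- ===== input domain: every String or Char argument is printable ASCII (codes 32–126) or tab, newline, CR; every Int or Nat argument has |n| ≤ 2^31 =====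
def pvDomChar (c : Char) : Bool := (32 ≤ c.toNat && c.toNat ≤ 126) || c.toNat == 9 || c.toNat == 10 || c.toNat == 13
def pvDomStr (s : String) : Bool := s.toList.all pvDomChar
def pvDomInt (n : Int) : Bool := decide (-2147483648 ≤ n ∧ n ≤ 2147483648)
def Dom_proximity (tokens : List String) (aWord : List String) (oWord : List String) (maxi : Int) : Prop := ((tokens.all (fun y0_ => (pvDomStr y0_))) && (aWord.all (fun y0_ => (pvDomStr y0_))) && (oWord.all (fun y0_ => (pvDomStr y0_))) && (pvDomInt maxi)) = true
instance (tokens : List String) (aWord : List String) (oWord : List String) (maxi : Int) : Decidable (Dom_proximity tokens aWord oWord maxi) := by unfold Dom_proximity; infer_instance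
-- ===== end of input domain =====

-- B replaces A's two position-list comprehensions + two-pointer merge by one early-exiting
-- pass over enumerate(tokens) remembering only the most recent aspect/opinion index (faster:
-- it stops at the first close pair and never materializes the position lists).

-- ===== PORT A =====
-- [i for i, token in enumerate(tokens) if token in ws]
def pvPositions (tokens : List String) (ws : List String) : List Int :=
  (PySem.List.enumerate tokens).filterMap (fun p => if ws.contains p.2 then some p.1 else none)

-- the while-loop over indices i, j; the suffixes aPos[i:], oPos[j:] are the loop state
def pvMergeLoop (maxi : Int) : List Int → List Int → Bool
  | a :: as', o :: os' =>
    if |a - o| ≤ maxi then true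
    else if a < o then pvMergeLoop maxi as' (o :: os')
    else pvMergeLoop maxi (a :: as') os'
  | _, _ => false
  termination_by as os => as.length + os.length

def proximity (tokens : List String) (aWord : List String) (oWord : List String) (maxi : Int) : Bool :=
  pvMergeLoop maxi (pvPositions tokens aWord) (pvPositions tokens oWord)

-- ===== PORT B =====
-- 'lastX is not None and i - lastX <= maxi'
def pvNear (last : Option Int) (i : Int) (maxi : Int) : Bool :=
  match last with
  | some j => i - j ≤ maxi
  | none => false

-- the for-loop over enumerate(tokens) with state (lastA, lastO)
def pvScan (aWord oWord : List String) (maxi : Int) :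
    List (Int × String) → Option Int → Option Int → Bool
  | [], _, _ => false
  | (i, t) :: rest, lastA, lastO =>
    if aWord.contains t && pvNear lastO i maxi then true
    else
      let lastA' := if aWord.contains t then some i else lastA
      if oWord.contains t && pvNear lastA' i maxi then true
      else pvScan aWord oWord maxi rest lastA' (if oWord.contains t then some i else lastO)

def proximity_alt (tokens : List String) (aWord : List String) (oWord : List String) (maxi : Int) : Bool :=
  pvScan aWord oWord maxi (PySem.List.enumerate tokens) none none

-- ===== PRECONDITION & SPEC =====
def Spec_proximity (tokens : List String) (aWord : List String) (oWord : List String) (maxi : Int) (out : Bool) : Prop := out = proximity_alt tokens aWord oWord maxi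
instance (tokens : List String) (aWord : List String) (oWord : List String) (maxi : Int) (out : Bool) : Decidable (Spec_proximity tokens aWord oWord maxi out) := by unfold Spec_proximity; infer_instance

-- ===== CLAIM (what is proved, stated in full; the proofs are below) =====
def Claim_equal_proximity : Prop := ∀ (tokens : List String) (aWord : List String) (oWord : List String) (maxi : Int), Dom_proximity tokens aWord oWord maxi → Spec_proximity tokens aWord oWord maxi (proximity tokens aWord oWord maxi)

-- ===== LEMMAS AND PROOFS =====

-- positions reachable by one side of B's scan: the remembered index or a matching token of ts
def pvReach (ws : List String) (last : Option Int) (k : Int) (ts : List String) (x : Int) : Prop :=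
  last = some x ∨ ∃ j : Nat, ∃ _ : j < ts.length, ts[j] ∈ ws ∧ x = k + (j : Int)

-- the common spec both ports are proved equal to
def pvSpec (tokens aWord oWord : List String) (maxi : Int) : Prop :=
  ∃ x y : Int, pvReach aWord none 0 tokens x ∧ pvReach oWord none 0 tokens y ∧ |x - y| ≤ maxi

lemma mem_pvPositions (tokens ws : List String) (x : Int) :
    x ∈ pvPositions tokens ws ↔
      ∃ j : Nat, ∃ _ : j < tokens.length, tokens[j] ∈ ws ∧ x = (j : Int) := by
  simp only [pvPositions, List.mem_filterMap, PySem.List.mem_enumerate_iff]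
  constructor
  · rintro ⟨⟨i, t⟩, ⟨k, hk, hp⟩, h⟩
    rw [Prod.mk.injEq] at hp
    obtain ⟨hi, ht⟩ := hp
    simp only [Option.ite_none_right_eq_some, Option.some.injEq] at h
    obtain ⟨hct, hix⟩ := h
    exact ⟨k, hk, by rw [← ht]; simpa using hct, by omega⟩
  · rintro ⟨j, hj, hc, hx⟩
    refine ⟨((j : Int), tokens[j]), ⟨j, hj, by simp⟩, ?_⟩
    simp only [Option.ite_none_right_eq_some, Option.some.injEq]
    exact ⟨by simpa using hc, hx.symm⟩

lemma pairwise_pvPositions (tokens ws : List String) :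
    (pvPositions tokens ws).Pairwise (· ≤ ·) := by
  have h := PySem.List.pairwise_lt_enumerate (xs := tokens) (s := 0)
  refine (h.filterMap (f := fun p => if ws.contains p.2 then some p.1 else none) ?_)
  rintro ⟨i, t⟩ ⟨i', t'⟩ hlt x hx y hy
  simp only at hlt
  simp only [Option.ite_none_right_eq_some, Option.some.injEq] at hx hy
  obtain ⟨-, hix⟩ := hx
  obtain ⟨-, hiy⟩ := hy
  omega

lemma pvMergeLoop_iff (maxi : Int) :
    ∀ n (as os : List Int), as.length + os.length ≤ n →
      as.Pairwise (· ≤ ·) → os.Pairwise (· ≤ ·) →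
      (pvMergeLoop maxi as os = true ↔ ∃ a ∈ as, ∃ o ∈ os, |a - o| ≤ maxi) := by
  intro n
  induction n with
  | zero =>
    rintro (_ | ⟨a, as'⟩) (_ | ⟨o, os'⟩) hn _ _
    · simp [pvMergeLoop]
    · simp [pvMergeLoop]
    · simp [pvMergeLoop]
    · exfalso; simp at hn
  | succ n ih =>
    rintro (_ | ⟨a, as'⟩) (_ | ⟨o, os'⟩) hn ha ho
    · simp [pvMergeLoop]
    · simp [pvMergeLoop]
    · simp [pvMergeLoop]
    · rw [pvMergeLoop]
      obtain ⟨hah, hat⟩ := List.pairwise_cons.mp ha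
      obtain ⟨hoh, hot⟩ := List.pairwise_cons.mp ho
      split_ifs with h1 h2
      · simp only [true_iff]
        exact ⟨a, List.mem_cons_self .., o, List.mem_cons_self .., h1⟩
      · rw [ih as' (o :: os') (by simp at hn ⊢; omega) hat ho]
        constructor
        · rintro ⟨x, hx, y, hy, hxy⟩
          exact ⟨x, List.mem_cons_of_mem _ hx, y, hy, hxy⟩
        · rintro ⟨x, hx, y, hy, hxy⟩
          rcases List.mem_cons.mp hx with rfl | hx'
          · -- x = a: y ≥ o, so |a - y| ≥ |a - o| > maxi: impossible
            exfalso
            have hoy : o ≤ y := by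
              rcases List.mem_cons.mp hy with rfl | hy'
              · exact le_refl _
              · exact hoh y hy'
            rw [abs_le] at hxy
            rw [abs_le] at h1
            omega
          · exact ⟨x, hx', y, hy, hxy⟩
      · rw [ih (a :: as') os' (by simp at hn ⊢; omega) ha hot]
        constructor
        · rintro ⟨x, hx, y, hy, hxy⟩
          exact ⟨x, hx, y, List.mem_cons_of_mem _ hy, hxy⟩
        · rintro ⟨x, hx, y, hy, hxy⟩
          rcases List.mem_cons.mp hy with rfl | hy'
          · exfalso
            have hax : a ≤ x := by
              rcases List.mem_cons.mp hx with rfl | hx'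
              · exact le_refl _
              · exact hah x hx'
            rw [abs_le] at hxy
            rw [abs_le] at h1
            omega
          · exact ⟨x, hx, y, hy', hxy⟩

lemma proximity_iff (tokens aWord oWord : List String) (maxi : Int) :
    proximity tokens aWord oWord maxi = true ↔ pvSpec tokens aWord oWord maxi := by
  rw [proximity,
    pvMergeLoop_iff maxi ((pvPositions tokens aWord).length + (pvPositions tokens oWord).length)
      _ _ (le_refl _) (pairwise_pvPositions ..) (pairwise_pvPositions ..)]
  unfold pvSpec pvReach
  constructor
  · rintro ⟨x, hx, y, hy, hxy⟩
    obtain ⟨j, hj, hc, rfl⟩ := (mem_pvPositions ..).mp hx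
    obtain ⟨j', hj', hc', rfl⟩ := (mem_pvPositions ..).mp hy
    exact ⟨j, j', Or.inr ⟨j, hj, hc, by omega⟩, Or.inr ⟨j', hj', hc', by omega⟩, hxy⟩
  · rintro ⟨x, y, (h | ⟨j, hj, hc, rfl⟩), hy, hxy⟩
    · simp at h
    rcases hy with h | ⟨j', hj', hc', rfl⟩
    · simp at h
    exact ⟨0 + (j : Int), (mem_pvPositions ..).mpr ⟨j, hj, hc, by omega⟩,
      0 + (j' : Int), (mem_pvPositions ..).mpr ⟨j', hj', hc', by omega⟩, hxy⟩

-- the scan invariant: true iff some reachable aspect/opinion pair is within maxi,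
-- where at least one of the two lies in the still-unprocessed suffix
lemma pvScan_iff (aWord oWord : List String) (maxi : Int) :
    ∀ (ts : List String) (k : Int) (lA lO : Option Int),
      (∀ a, lA = some a → a < k) → (∀ o, lO = some o → o < k) →
      (pvScan aWord oWord maxi (PySem.List.enumerate ts k) lA lO = true ↔
        ∃ x y : Int, pvReach aWord lA k ts x ∧ pvReach oWord lO k ts y ∧
          (k ≤ x ∨ k ≤ y) ∧ |x - y| ≤ maxi) := by
  intro ts
  induction ts with
  | nil =>
    intro k lA lO hA hO
    rw [PySem.List.enumerate_nil]
    simp only [pvScan, Bool.false_eq_true, false_iff]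
    rintro ⟨x, y, hx, hy, hk, -⟩
    rcases hx with hx | ⟨j, hj, -, -⟩
    · rcases hy with hy | ⟨j, hj, -, -⟩
      · have := hA x hx; have := hO y hy; omega
      · simp at hj
    · simp at hj
  | cons t ts' ih =>
    intro k lA lO hA hO
    rw [PySem.List.enumerate_cons]
    simp only [pvScan]
    set cA := aWord.contains t with hcA
    set cO := oWord.contains t with hcO
    set lA' : Option Int := if cA = true then some k else lA with hlA'
    set lO' : Option Int := if cO = true then some k else lO with hlO'
    have hAmem : cA = true ↔ t ∈ aWord := by rw [hcA]; simp
    have hOmem : cO = true ↔ t ∈ oWord := by rw [hcO]; simp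
    have hA' : ∀ a, lA' = some a → a < k + 1 := by
      intro a h; rw [hlA'] at h; split at h
      · cases h; omega
      · have := hA a h; omega
    have hO' : ∀ o, lO' = some o → o < k + 1 := by
      intro o h; rw [hlO'] at h; split at h
      · cases h; omega
      · have := hO o h; omega
    have hIH := ih (k + 1) lA' lO' hA' hO'
    -- reusable facts about pvReach on the cons
    have shiftA : ∀ x, pvReach aWord lA' (k + 1) ts' x → pvReach aWord lA k (t :: ts') x := by
      intro x hx
      rcases hx with hx | ⟨j, hj, hc, rfl⟩
      · rw [hlA'] at hx; split at hx
        · cases hx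
          exact Or.inr ⟨0, by simp, by simpa using hAmem.mp (by assumption), by omega⟩
        · exact Or.inl hx
      · exact Or.inr ⟨j + 1, by simpa using hj, by simpa using hc, by push_cast; ring⟩
    have shiftO : ∀ y, pvReach oWord lO' (k + 1) ts' y → pvReach oWord lO k (t :: ts') y := by
      intro y hy
      rcases hy with hy | ⟨j, hj, hc, rfl⟩
      · rw [hlO'] at hy; split at hy
        · cases hy
          exact Or.inr ⟨0, by simp, by simpa using hOmem.mp (by assumption), by omega⟩
        · exact Or.inl hy
      · exact Or.inr ⟨j + 1, by simpa using hj, by simpa using hc, by push_cast; ring⟩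
    by_cases h1 : (cA && pvNear lO k maxi) = true
    · -- aspect check fired: token is aspect, lastO close
      rw [if_pos h1]
      simp only [true_iff]
      obtain ⟨hca, hnear⟩ := Bool.and_eq_true_iff.mp h1
      rcases hlo : lO with _ | o
      · rw [hlo] at hnear; simp [pvNear] at hnear
      · rw [hlo] at hnear
        simp only [pvNear, decide_eq_true_eq] at hnear
        have ho : o < k := hO o hlo
        refine ⟨k, o, Or.inr ⟨0, by simp, by simpa using hAmem.mp hca, by omega⟩,
          Or.inl rfl,
          Or.inl (le_refl _), ?_⟩
        rw [abs_le]; omega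
    · rw [if_neg h1]
      by_cases h2 : (cO && pvNear lA' k maxi) = true
      · -- opinion check fired: token is opinion, lastA' close
        rw [if_pos h2]
        simp only [true_iff]
        obtain ⟨hco, hnear⟩ := Bool.and_eq_true_iff.mp h2
        rcases hla : lA' with _ | a
        · rw [hla] at hnear; simp [pvNear] at hnear
        · rw [hla] at hnear
          simp only [pvNear, decide_eq_true_eq] at hnear
          have ha : a ≤ k := by have := hA' a hla; omega
          have hxA : pvReach aWord lA k (t :: ts') a := by
            rw [hlA'] at hla; split at hla
            · cases hla
              exact Or.inr ⟨0, by simp, by simpa using hAmem.mp (by assumption), by omega⟩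
            · exact Or.inl hla
          exact ⟨a, k, hxA, Or.inr ⟨0, by simp, by simpa using hOmem.mp hco, by omega⟩,
            Or.inr (le_refl _), by rw [abs_le]; omega⟩
      · -- neither check fired: reduce to the tail
        rw [if_neg h2, hIH]
        constructor
        · rintro ⟨x, y, hx, hy, hk1, hxy⟩
          exact ⟨x, y, shiftA x hx, shiftO y hy, by omega, hxy⟩
        · rintro ⟨x, y, hx, hy, hk1, hxy⟩
          -- classify the origins of x and y on the cons list
          have hx' : lA = some x ∨ (cA = true ∧ x = k) ∨
              (∃ j : Nat, ∃ _ : j < ts'.length, ts'[j] ∈ aWord ∧ x = (k+1) + (j:Int)) := by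
            rcases hx with hx | ⟨j, hj, hc, rfl⟩
            · exact Or.inl hx
            · cases j with
              | zero => exact Or.inr (Or.inl ⟨hAmem.mpr (by simpa using hc), by omega⟩)
              | succ j =>
                exact Or.inr (Or.inr ⟨j, by simpa using hj, by simpa using hc, by push_cast; ring⟩)
          have hy' : lO = some y ∨ (cO = true ∧ y = k) ∨
              (∃ j : Nat, ∃ _ : j < ts'.length, ts'[j] ∈ oWord ∧ y = (k+1) + (j:Int)) := by
            rcases hy with hy | ⟨j, hj, hc, rfl⟩
            · exact Or.inl hy
            · cases j with
              | zero => exact Or.inr (Or.inl ⟨hOmem.mpr (by simpa using hc), by omega⟩)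
              | succ j =>
                exact Or.inr (Or.inr ⟨j, by simpa using hj, by simpa using hc, by push_cast; ring⟩)
          -- the updated memories bound the old ones from above by k
          have hlA'mem : ∀ a, lA = some a → ∃ a', lA' = some a' ∧ a ≤ a' ∧ a' ≤ k := by
            intro a h
            rw [hlA']; split
            · exact ⟨k, rfl, le_of_lt (hA a h), le_refl _⟩
            · exact ⟨a, h, le_refl _, le_of_lt (hA a h)⟩
          have hlO'mem : ∀ o, lO = some o → ∃ o', lO' = some o' ∧ o ≤ o' ∧ o' ≤ k := by
            intro o h
            rw [hlO']; split
            · exact ⟨k, rfl, le_of_lt (hO o h), le_refl _⟩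
            · exact ⟨o, h, le_refl _, le_of_lt (hO o h)⟩
          have habs := abs_le.mp hxy
          rcases hx' with hxm | ⟨hca, hxk⟩ | ⟨j, hj, hc, rfl⟩
          · -- x from memory (x < k)
            have hxk := hA x hxm
            rcases hy' with hym | ⟨hco, hyk⟩ | ⟨j', hj', hc', rfl⟩
            · exfalso; have := hO y hym; omega
            · -- y = k: the opinion check at the head would have fired
              exfalso
              obtain ⟨a', ha', hle, hak⟩ := hlA'mem x hxm
              apply h2
              rw [Bool.and_eq_true_iff]
              refine ⟨hco, ?_⟩
              rw [ha']
              simp only [pvNear, decide_eq_true_eq]; omega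
            · -- y in the tail
              obtain ⟨a', ha', hle, hak⟩ := hlA'mem x hxm
              refine ⟨a', (k+1) + (j':Int), Or.inl ha', Or.inr ⟨j', hj', hc', rfl⟩, by omega, ?_⟩
              rw [abs_le]; omega
          · -- x = k, token is aspect
            rcases hy' with hym | ⟨hco, hyk⟩ | ⟨j', hj', hc', rfl⟩
            · -- y from memory: the aspect check at the head would have fired
              exfalso
              have hyk := hO y hym
              apply h1
              rw [Bool.and_eq_true_iff]
              refine ⟨hca, ?_⟩
              rw [hym]
              simp only [pvNear, decide_eq_true_eq]; omega
            · -- y = k too: token in both; opinion check fires with lA' = some k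
              exfalso
              apply h2
              rw [Bool.and_eq_true_iff]
              refine ⟨hco, ?_⟩
              have hka : lA' = some k := by rw [hlA', hca]; simp
              rw [hka]
              simp only [pvNear, decide_eq_true_eq]; omega
            · -- y in the tail; lA' = some k
              have hka : lA' = some k := by rw [hlA', hca]; simp
              exact ⟨k, (k+1) + (j':Int), Or.inl hka, Or.inr ⟨j', hj', hc', rfl⟩, by omega,
                by rw [abs_le] at hxy ⊢; omega⟩
          · -- x in the tail
            rcases hy' with hym | ⟨hco, hyk⟩ | ⟨j', hj', hc', rfl⟩
            · obtain ⟨o', ho', hle, hok⟩ := hlO'mem y hym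
              refine ⟨(k+1) + (j:Int), o', Or.inr ⟨j, hj, hc, rfl⟩, Or.inl ho', by omega, ?_⟩
              rw [abs_le]; omega
            · have hko : lO' = some k := by rw [hlO', hco]; simp
              exact ⟨(k+1) + (j:Int), k, Or.inr ⟨j, hj, hc, rfl⟩, Or.inl hko, by omega,
                by rw [abs_le] at hxy ⊢; omega⟩
            · exact ⟨(k+1) + (j:Int), (k+1) + (j':Int), Or.inr ⟨j, hj, hc, rfl⟩,
                Or.inr ⟨j', hj', hc', rfl⟩, by omega, hxy⟩

lemma proximity_alt_iff (tokens aWord oWord : List String) (maxi : Int) :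
    proximity_alt tokens aWord oWord maxi = true ↔ pvSpec tokens aWord oWord maxi := by
  rw [proximity_alt, pvScan_iff aWord oWord maxi tokens 0 none none (by simp) (by simp)]
  unfold pvSpec
  constructor
  · rintro ⟨x, y, hx, hy, -, hxy⟩
    exact ⟨x, y, hx, hy, hxy⟩
  · rintro ⟨x, y, hx, hy, hxy⟩
    have hx0 : 0 ≤ x := by
      rcases hx with h | ⟨j, hj, -, rfl⟩
      · simp at h
      · omega
    exact ⟨x, y, hx, hy, Or.inl hx0, hxy⟩

-- ===== VERDICT (by name: the statement is the Claim_ definition above) =====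
theorem proximity_spec : Claim_equal_proximity := by
  intro tokens aWord oWord maxi _
  unfold Spec_proximity
  have h := (proximity_iff tokens aWord oWord maxi).trans
    (proximity_alt_iff tokens aWord oWord maxi).symm
  cases hA : proximity tokens aWord oWord maxi <;>
    cases hB : proximity_alt tokens aWord oWord maxi <;>
      simp_all
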